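-- pv_equiv track=rewrite | github.com/takapdayon/atcoder | abc/AtCoderBeginnerContest133/C.py | remainder_minimization
-- ===== SOURCE A (Python) =====
-- def remainder_minimization(l, r):
--
--     ans = 10**9
--
--     for i in range(l, r):
--         for w in range(i+1, r):
--             ans = min(ans, (i*w)%2019)
--         if ans == 0:
--             break
--
--     return ans
-- ===== SOURCE B (Python) =====
-- def remainder_minimization(l, r):
--     # fewer than two numbers in [l, r): no pair exists
--     if r - l < 2:
--         return 10**9
--     # a span of >= 2019 numbers contains a multiple of 2019 and a partner
--     if r - l >= 2019:
--         return 0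
--     # otherwise work modulo 2019: the span is short, residues determine everything
--     res = [x % 2019 for x in range(l, r)]
--     best = 2018
--     for idx in range(len(res)):
--         a = res[idx]
--         for b in res[idx + 1:]:
--             best = min(best, a * b % 2019)
--     return best
-- ===== Notes on version B (the rewrite author's own statement) =====
-- stated objective: alternative
-- what changed: B replaces A's full double loop with its break by closed-form answers for the trivial (<2 numbers) and wide (span >= 2019, answer 0) cases and a pair scan over the at-most-2018 residues mod 2019 otherwise; intended as faster on wide ranges (measured up to ~60x at n=262144 but not consistently, since A's break also exits early on many wide inputs).
import Mathlib
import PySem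

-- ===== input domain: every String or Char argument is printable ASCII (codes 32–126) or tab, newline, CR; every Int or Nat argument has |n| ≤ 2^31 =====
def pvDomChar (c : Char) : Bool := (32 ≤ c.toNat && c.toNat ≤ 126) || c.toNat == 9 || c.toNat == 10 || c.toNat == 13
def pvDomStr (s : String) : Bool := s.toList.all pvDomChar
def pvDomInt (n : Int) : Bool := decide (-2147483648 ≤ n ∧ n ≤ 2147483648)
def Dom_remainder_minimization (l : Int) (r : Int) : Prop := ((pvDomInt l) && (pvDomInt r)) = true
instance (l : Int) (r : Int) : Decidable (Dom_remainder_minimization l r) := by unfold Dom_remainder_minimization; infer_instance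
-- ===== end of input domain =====

-- B replaces A's full double loop by closed-form answers for the trivial and wide cases and a
-- pair scan over the residues mod 2019 otherwise (objective: alternative algorithm).

-- ===== PORT A =====
-- outer 'for i in range(l, r)' with inner 'for w in range(i+1, r)' and 'if ans == 0: break'
def pvOuterA (r : Int) : List Int → Int → Int
  | [], ans => ans
  | i :: rest, ans =>
      let a := (PySem.List.pyRange (i+1) r 1).foldl (fun acc w => min acc (PySem.Int.mod (i*w) 2019)) ans
      if a = 0 then a else pvOuterA r rest a

def remainder_minimization (l : Int) (r : Int) : Int :=
  pvOuterA r (PySem.List.pyRange l r 1) (10^9)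

-- ===== PORT B =====
-- 'for idx in range(len(res)): a = res[idx]; for b in res[idx+1:]: best = min(best, a*b % 2019)'
def pvPairsB : List Int → Int → Int
  | [], best => best
  | a :: rest, best => pvPairsB rest (rest.foldl (fun m b => min m (PySem.Int.mod (a*b) 2019)) best)

def remainder_minimization_alt (l : Int) (r : Int) : Int :=
  if r - l < 2 then 10^9
  else if 2019 ≤ r - l then 0
  else pvPairsB ((PySem.List.pyRange l r 1).map (fun x => PySem.Int.mod x 2019)) 2018

-- ===== PRECONDITION & SPEC =====
def Spec_remainder_minimization (l : Int) (r : Int) (out : Int) : Prop := out = remainder_minimization_alt l r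
instance (l : Int) (r : Int) (out : Int) : Decidable (Spec_remainder_minimization l r out) := by unfold Spec_remainder_minimization; infer_instance

-- ===== CLAIM (what is proved, stated in full; the proofs are below) =====
def Claim_equal_remainder_minimization : Prop := ∀ (l : Int) (r : Int), Dom_remainder_minimization l r → Spec_remainder_minimization l r (remainder_minimization l r)

-- ===== LEMMAS AND PROOFS =====

-- generic facts about a running-minimum fold
theorem pvFold_le_init (f : Int → Int) : ∀ (ws : List Int) (c : Int),
    ws.foldl (fun m b => min m (f b)) c ≤ c := by
  intro ws
  induction ws with
  | nil => intro c; simp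
  | cons w ws ih =>
      intro c
      exact le_trans (ih (min c (f w))) (min_le_left _ _)

theorem pvFold_le_mem (f : Int → Int) : ∀ (ws : List Int) (c w : Int), w ∈ ws →
    ws.foldl (fun m b => min m (f b)) c ≤ f w := by
  intro ws
  induction ws with
  | nil => intro c w h; simp at h
  | cons x xs ih =>
      intro c w h
      rcases List.mem_cons.mp h with h | h
      · subst h
        exact le_trans (pvFold_le_init f xs (min c (f w))) (min_le_right _ _)
      · exact ih _ w h

theorem pvFold_nonneg (f : Int → Int) (hf : ∀ b, 0 ≤ f b) : ∀ (ws : List Int) (c : Int),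
    0 ≤ c → 0 ≤ ws.foldl (fun m b => min m (f b)) c := by
  intro ws
  induction ws with
  | nil => intro c hc; simpa using hc
  | cons x xs ih =>
      intro c hc
      exact ih _ (le_min hc (hf x))

theorem pvMod2019_nonneg (a : Int) : 0 ≤ PySem.Int.mod a 2019 :=
  PySem.Int.mod_nonneg a (by norm_num)

theorem pvMod2019_le (a : Int) : PySem.Int.mod a 2019 ≤ 2018 := by
  have := PySem.Int.mod_lt a (b := 2019) (by norm_num)
  omega

-- facts about B's pair fold
theorem pvPairsB_le_init : ∀ (xs : List Int) (c : Int), pvPairsB xs c ≤ c := by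
  intro xs
  induction xs with
  | nil => intro c; simp [pvPairsB]
  | cons a rest ih =>
      intro c
      exact le_trans (ih _) (pvFold_le_init (fun b => PySem.Int.mod (a*b) 2019) rest c)

theorem pvPairsB_nonneg : ∀ (xs : List Int) (c : Int), 0 ≤ c → 0 ≤ pvPairsB xs c := by
  intro xs
  induction xs with
  | nil => intro c hc; simpa [pvPairsB] using hc
  | cons a rest ih =>
      intro c hc
      exact ih _ (pvFold_nonneg (fun b => PySem.Int.mod (a*b) 2019)
        (fun b => pvMod2019_nonneg (a*b)) rest c hc)

theorem pvPairsB_zero (xs : List Int) : pvPairsB xs 0 = 0 :=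
  le_antisymm (pvPairsB_le_init xs 0) (pvPairsB_nonneg xs 0 le_rfl)

theorem pvPairsB_le_pair (x : Int) (rest : List Int) (c w : Int) (hw : w ∈ rest) :
    pvPairsB (x :: rest) c ≤ PySem.Int.mod (x*w) 2019 := by
  show pvPairsB rest _ ≤ _
  exact le_trans (pvPairsB_le_init _ _)
    (pvFold_le_mem (fun b => PySem.Int.mod (x*b) 2019) rest c w hw)

-- A's break-loop over a range equals B's break-free pair fold over the same range
theorem pvOuterA_eq_pairs (r : Int) : ∀ (n : Nat) (a ans : Int), (r - a).toNat ≤ n →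
    pvOuterA r (PySem.List.pyRange a r 1) ans = pvPairsB (PySem.List.pyRange a r 1) ans := by
  intro n
  induction n with
  | zero =>
      intro a ans h
      rw [PySem.List.pyRange_one_eq_nil (by omega)]
      rfl
  | succ n ih =>
      intro a ans h
      by_cases hra : r ≤ a
      · rw [PySem.List.pyRange_one_eq_nil hra]
        rfl
      · rw [PySem.List.pyRange_one_cons (by omega)]
        simp only [pvOuterA, pvPairsB]
        by_cases hz : (PySem.List.pyRange (a+1) r 1).foldl
            (fun acc w => min acc (PySem.Int.mod (a*w) 2019)) ans = 0
        · rw [hz, if_pos rfl, pvPairsB_zero]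
        · rw [if_neg hz]
          exact ih (a+1) _ (by omega)

-- mapping every element to its residue mod 2019 does not change the pair fold
theorem pvPairsB_map_mod : ∀ (xs : List Int) (c : Int),
    pvPairsB (xs.map (fun x => PySem.Int.mod x 2019)) c = pvPairsB xs c := by
  intro xs
  induction xs with
  | nil => intro c; rfl
  | cons a rest ih =>
      intro c
      show pvPairsB (rest.map _) _ = pvPairsB rest _
      rw [ih]
      simp only [List.foldl_map]
      have hfun : (fun (m b : Int) => min m (PySem.Int.mod (PySem.Int.mod a 2019 * PySem.Int.mod b 2019) 2019))
          = fun (m b : Int) => min m (PySem.Int.mod (a*b) 2019) := by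
        funext m b
        congr 1
        rw [PySem.Int.mod_eq_emod_of_pos (a := PySem.Int.mod a 2019 * PySem.Int.mod b 2019) (by norm_num),
          PySem.Int.mod_eq_emod_of_pos (a := a * b) (by norm_num),
          PySem.Int.mod_eq_emod_of_pos (a := a) (by norm_num),
          PySem.Int.mod_eq_emod_of_pos (a := b) (by norm_num)]
        exact (Int.mul_emod a b 2019).symm
      rw [hfun]

-- with at least two elements the initial value is irrelevant once it is ≥ 2018
theorem pvPairsB_init_big (x y : Int) (rest : List Int) (c c' : Int)
    (hc : 2018 ≤ c) (hc' : 2018 ≤ c') :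
    pvPairsB (x :: y :: rest) c = pvPairsB (x :: y :: rest) c' := by
  show pvPairsB (y :: rest) (List.foldl _ c (y :: rest))
     = pvPairsB (y :: rest) (List.foldl _ c' (y :: rest))
  have hxy := pvMod2019_le (x*y)
  simp only [List.foldl_cons]
  rw [min_eq_right (by omega), min_eq_right (by omega)]

-- on a span of at least 2019 numbers the pair fold reaches 0
theorem pvPairsB_range_wide (l r c : Int) (hc : 0 ≤ c) (h : 2019 ≤ r - l) :
    pvPairsB (PySem.List.pyRange l r 1) c = 0 := by
  have hlr : l < r := by omega
  rw [PySem.List.pyRange_one_cons hlr]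
  set m : Int := l + (-l) % 2019 with hm
  have hml : l ≤ m := by omega
  have hmr : m < l + 2019 := by omega
  have hdvd : (2019:Int) ∣ m := by omega
  have hle : pvPairsB (l :: PySem.List.pyRange (l+1) r 1) c ≤ 0 := by
    by_cases hcase : m = l
    · have h1 : (l+1) ∈ PySem.List.pyRange (l+1) r 1 := by
        rw [PySem.List.mem_pyRange_one]; omega
      have := pvPairsB_le_pair l (PySem.List.pyRange (l+1) r 1) c (l+1) h1
      have hz : PySem.Int.mod (l*(l+1)) 2019 = 0 := by
        rw [PySem.Int.mod_eq_zero_iff_dvd]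
        exact Dvd.dvd.mul_right (hcase ▸ hdvd) (l+1)
      omega
    · have h1 : m ∈ PySem.List.pyRange (l+1) r 1 := by
        rw [PySem.List.mem_pyRange_one]; omega
      have := pvPairsB_le_pair l (PySem.List.pyRange (l+1) r 1) c m h1
      have hz : PySem.Int.mod (l*m) 2019 = 0 := by
        rw [PySem.Int.mod_eq_zero_iff_dvd]
        exact Dvd.dvd.mul_left hdvd l
      omega
  have hge : 0 ≤ pvPairsB (l :: PySem.List.pyRange (l+1) r 1) c :=
    pvPairsB_nonneg _ c hc
  omega

-- ===== VERDICT (by name: the statement is the Claim_ definition above) =====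
theorem remainder_minimization_spec : Claim_equal_remainder_minimization := by
  intro l r _
  unfold Spec_remainder_minimization remainder_minimization remainder_minimization_alt
  have hA := pvOuterA_eq_pairs r (r - l).toNat l (10^9) le_rfl
  by_cases h1 : r - l < 2
  · rw [if_pos h1]
    by_cases h0 : r ≤ l
    · rw [PySem.List.pyRange_one_eq_nil h0]; rfl
    · have : r = l + 1 := by omega
      subst this
      rw [PySem.List.pyRange_one_cons (by omega)]
      simp only [pvOuterA, PySem.List.pyRange_one_eq_nil (le_refl (l+1))]
      norm_num [pvOuterA]
  · rw [if_neg h1, hA]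
    by_cases h2 : 2019 ≤ r - l
    · rw [if_pos h2]
      exact pvPairsB_range_wide l r (10^9) (by norm_num) h2
    · rw [if_neg h2, pvPairsB_map_mod]
      have hcons : PySem.List.pyRange l r 1
          = l :: (l+1) :: PySem.List.pyRange (l+1+1) r 1 := by
        rw [PySem.List.pyRange_one_cons (by omega), PySem.List.pyRange_one_cons (by omega)]
      rw [hcons]
      exact pvPairsB_init_big l (l+1) _ (10^9) 2018 (by norm_num) le_rfl
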